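-- pv_equiv track=rewrite | github.com/Stwrblnd/MakeTheMusicAI | MakeTheMusic.py | generate_lead_melody
-- ===== SOURCE A (Python) =====
-- def generate_lead_melody(chords_notes, tempo, repetitions):
--     if not chords_notes:
--         return []
--
--     lead_notes = []
--     time_offset = 0
--
--     for _ in range(repetitions):
--         for chord in chords_notes:
--             if len(chord) < 3:
--                 continue
--
--             midi_notes = sorted(chord)
--             midi_notes = [note + 12 for note in midi_notes]
--
--             rhythm_pattern = [1, 1, 2]
--
--             note_time = time_offset
--             for note, duration in zip(midi_notes, rhythm_pattern):
--                 lead_notes.append((note, note_time, duration))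
--                 note_time += duration
--
--             time_offset += 4
--
--     return lead_notes
-- ===== SOURCE B (Python) =====
-- def generate_lead_melody(chords_notes, tempo, repetitions):
--     # Build the one-repetition template once, then translate it per repetition.
--     base = []
--     offset = 0
--     for chord in chords_notes:
--         if len(chord) < 3:
--             continue
--         lo, mid, hi = sorted(chord)[:3]
--         base += [(lo + 12, offset, 1), (mid + 12, offset + 1, 1), (hi + 12, offset + 2, 2)]
--         offset += 4
--     result = []
--     for rep in range(repetitions):
--         shift = rep * offset
--         result += [(note, t + shift, d) for (note, t, d) in base]
--     return result
-- ===== Notes on version B (the rewrite author's own statement) =====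
-- stated objective: faster
-- what changed: B builds the per-repetition template (sorted+12, rhythm 1,1,2) in a single pass over the chords and then emits each repetition by translating that template by rep*span, instead of re-sorting and re-building every chord on every repetition.
import Mathlib
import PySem

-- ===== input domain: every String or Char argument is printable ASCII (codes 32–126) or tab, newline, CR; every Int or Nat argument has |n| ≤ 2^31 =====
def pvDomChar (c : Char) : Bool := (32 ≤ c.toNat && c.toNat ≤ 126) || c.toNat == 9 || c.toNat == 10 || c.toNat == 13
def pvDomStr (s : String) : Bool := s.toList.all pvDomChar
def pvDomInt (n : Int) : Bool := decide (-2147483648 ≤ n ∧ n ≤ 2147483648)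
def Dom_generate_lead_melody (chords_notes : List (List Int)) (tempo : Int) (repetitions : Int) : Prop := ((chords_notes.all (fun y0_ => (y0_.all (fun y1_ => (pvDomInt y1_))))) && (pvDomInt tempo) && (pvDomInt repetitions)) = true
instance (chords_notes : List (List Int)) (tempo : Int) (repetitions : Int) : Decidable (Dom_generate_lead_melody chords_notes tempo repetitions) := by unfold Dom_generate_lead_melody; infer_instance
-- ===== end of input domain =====

-- B computes the one-repetition template once and translates it per repetition, instead of
-- recomputing every chord's sort and rhythm on every repetition (constant-factor speedup).

-- ===== PORT A =====
def generate_lead_melody (chords_notes : List (List Int)) (tempo : Int) (repetitions : Int) : List (Int × Int × Int) :=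
  if chords_notes = [] then []
  else
    ((PySem.List.pyRange 0 repetitions 1).foldl (fun (st : List (Int × Int × Int) × Int) _ =>
      chords_notes.foldl (fun (st : List (Int × Int × Int) × Int) chord =>
        if (chord.length : Int) < 3 then st
        else
          let midi_notes := (PySem.List.sorted chord (fun x => x) false).map (fun note => note + 12)
          let inner := (midi_notes.zip [1, 1, 2]).foldl
            (fun (p : List (Int × Int × Int) × Int) nd => (p.1 ++ [(nd.1, p.2, nd.2)], p.2 + nd.2))
            (st.1, st.2)
          (inner.1, st.2 + 4)) st) ([], 0)).1

-- ===== PORT B =====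
def generate_lead_melody_alt (chords_notes : List (List Int)) (tempo : Int) (repetitions : Int) : List (Int × Int × Int) :=
  let bo := chords_notes.foldl (fun (bo : List (Int × Int × Int) × Int) chord =>
    if (chord.length : Int) < 3 then bo
    else
      match (PySem.List.sorted chord (fun x => x) false).take 3 with
      | [lo, mid, hi] =>
          (bo.1 ++ [(lo + 12, bo.2, 1), (mid + 12, bo.2 + 1, 1), (hi + 12, bo.2 + 2, 2)], bo.2 + 4)
      | _ => bo  -- unreachable: the chord has ≥ 3 notes, so take 3 yields three elements
    ) ([], 0)
  (PySem.List.pyRange 0 repetitions 1).foldl (fun res rep =>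
    res ++ bo.1.map (fun t => (t.1, t.2.1 + rep * bo.2, t.2.2))) []

-- ===== PRECONDITION & SPEC =====
def Spec_generate_lead_melody (chords_notes : List (List Int)) (tempo : Int) (repetitions : Int) (out : List (Int × Int × Int)) : Prop := out = generate_lead_melody_alt chords_notes tempo repetitions
instance (chords_notes : List (List Int)) (tempo : Int) (repetitions : Int) (out : List (Int × Int × Int)) : Decidable (Spec_generate_lead_melody chords_notes tempo repetitions out) := by unfold Spec_generate_lead_melody; infer_instance

-- ===== CLAIM (what is proved, stated in full; the proofs are below) =====
def Claim_equal_generate_lead_melody : Prop := ∀ (chords_notes : List (List Int)) (tempo : Int) (repetitions : Int), Dom_generate_lead_melody chords_notes tempo repetitions → Spec_generate_lead_melody chords_notes tempo repetitions (generate_lead_melody chords_notes tempo repetitions)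

-- ===== LEMMAS AND PROOFS =====

-- the one-repetition template starting at time offset `off`
def pvTmpl (off : Int) : List (List Int) → List (Int × Int × Int)
  | [] => []
  | c :: cs =>
    if (c.length : Int) < 3 then pvTmpl off cs
    else
      (match (PySem.List.sorted c (fun x => x) false).take 3 with
       | [lo, mid, hi] => [(lo + 12, off, 1), (mid + 12, off + 1, 1), (hi + 12, off + 2, 2)]
       | _ => []) ++ pvTmpl (off + 4) cs

-- time advanced by one repetition (4 per valid chord)
def pvSpan : List (List Int) → Int
  | [] => 0
  | c :: cs => (if (c.length : Int) < 3 then 0 else 4) + pvSpan cs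

theorem pvTmpl_shift (cs : List (List Int)) : ∀ (off s : Int),
    pvTmpl (off + s) cs = (pvTmpl off cs).map (fun t => (t.1, t.2.1 + s, t.2.2)) := by
  induction cs with
  | nil => intro off s; simp [pvTmpl]
  | cons c cs ih =>
    intro off s
    by_cases h : (c.length : Int) < 3
    · simp [pvTmpl, h, ih]
    · simp only [pvTmpl, if_neg h, List.map_append]
      have : off + s + 4 = (off + 4) + s := by ring
      rw [this, ih]
      congr 1
      rcases hs : (PySem.List.sorted c (fun x => x) false).take 3 with _ | ⟨a, _ | ⟨b, _ | ⟨d, _ | _⟩⟩⟩ <;>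
        simp <;> ring_nf <;> simp [add_comm, add_assoc, add_left_comm]

theorem pv_take3 (c : List Int) (h : ¬ (c.length : Int) < 3) :
    ∃ a b d, (PySem.List.sorted c (fun x => x) false).take 3 = [a, b, d] := by
  have hl : (PySem.List.sorted c (fun x => x) false).length = c.length :=
    PySem.List.length_sorted c (fun x => x) false
  have h3 : 3 ≤ (PySem.List.sorted c (fun x => x) false).length := by omega
  rcases hs : PySem.List.sorted c (fun x => x) false with _ | ⟨a, _ | ⟨b, _ | ⟨d, r⟩⟩⟩ <;>
    simp [hs] at h3 ⊢ <;> omega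

-- A's inner pass over the chords equals appending the template and advancing by the span
theorem pvPassA (cs : List (List Int)) : ∀ (L : List (Int × Int × Int)) (off : Int),
    cs.foldl (fun (st : List (Int × Int × Int) × Int) chord =>
        if (chord.length : Int) < 3 then st
        else
          let midi_notes := (PySem.List.sorted chord (fun x => x) false).map (fun note => note + 12)
          let inner := (midi_notes.zip [1, 1, 2]).foldl
            (fun (p : List (Int × Int × Int) × Int) nd => (p.1 ++ [(nd.1, p.2, nd.2)], p.2 + nd.2))
            (st.1, st.2)
          (inner.1, st.2 + 4)) (L, off)
      = (L ++ pvTmpl off cs, off + pvSpan cs) := by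
  induction cs with
  | nil => intro L off; simp [pvTmpl, pvSpan]
  | cons c cs ih =>
    intro L off
    by_cases h : (c.length : Int) < 3
    · simp only [List.foldl_cons, if_pos h, ih, pvTmpl, pvSpan, if_pos h]
      simp
    · obtain ⟨a, b, d, hs⟩ := pv_take3 c h
      have hz : ((PySem.List.sorted c (fun x => x) false).map (fun note => note + 12)).zip
            ([1, 1, 2] : List Int) = [(a + 12, 1), (b + 12, 1), (d + 12, 2)] := by
        rcases he : PySem.List.sorted c (fun x => x) false with _ | ⟨x, _ | ⟨y, _ | ⟨z, r⟩⟩⟩ <;>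
          simp [he] at hs <;> simp_all [List.zip]
      simp only [List.foldl_cons, if_neg h, hz, List.foldl, ih, pvTmpl, pvSpan, if_neg h, hs]
      rw [Prod.mk.injEq]
      exact ⟨by simp; try omega, by ring⟩

-- B's template-building pass equals the same template/span
theorem pvPassB (cs : List (List Int)) : ∀ (L : List (Int × Int × Int)) (off : Int),
    cs.foldl (fun (bo : List (Int × Int × Int) × Int) chord =>
        if (chord.length : Int) < 3 then bo
        else
          match (PySem.List.sorted chord (fun x => x) false).take 3 with
          | [lo, mid, hi] =>
              (bo.1 ++ [(lo + 12, bo.2, 1), (mid + 12, bo.2 + 1, 1), (hi + 12, bo.2 + 2, 2)], bo.2 + 4)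
          | _ => bo) (L, off)
      = (L ++ pvTmpl off cs, off + pvSpan cs) := by
  induction cs with
  | nil => intro L off; simp [pvTmpl, pvSpan]
  | cons c cs ih =>
    intro L off
    by_cases h : (c.length : Int) < 3
    · simp only [List.foldl_cons, if_pos h, ih, pvTmpl, pvSpan, if_pos h]
      simp
    · obtain ⟨a, b, d, hs⟩ := pv_take3 c h
      simp only [List.foldl_cons, if_neg h, hs, ih, pvTmpl, pvSpan, if_neg h]
      rw [Prod.mk.injEq]
      exact ⟨by simp; try omega, by ring⟩

-- the outer repetition loops agree, and A's running offset is rep * span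
theorem pvOuter (cs : List (List Int)) (n : Nat) :
    (PySem.List.pyRange 0 n 1).foldl (fun (st : List (Int × Int × Int) × Int) _ =>
        (st.1 ++ pvTmpl st.2 cs, st.2 + pvSpan cs)) ([], 0)
      = ((PySem.List.pyRange 0 n 1).foldl (fun res rep =>
          res ++ (pvTmpl 0 cs).map (fun t => (t.1, t.2.1 + rep * pvSpan cs, t.2.2))) [],
         (n : Int) * pvSpan cs) := by
  induction n with
  | zero => simp [PySem.List.pyRange_one_eq_nil]
  | succ n ih =>
    have hr : PySem.List.pyRange 0 ((n : Int) + 1) 1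
        = PySem.List.pyRange 0 (n : Int) 1 ++ [(n : Int)] :=
      PySem.List.pyRange_one_succ_right (by omega)
    have hc : ((n : Nat) + 1 : Nat) = (((n : Int) + 1).toNat) := by omega
    push_cast
    rw [hr, List.foldl_append, List.foldl_append, ih]
    simp only [List.foldl]
    rw [Prod.mk.injEq]
    refine ⟨?_, by ring⟩
    have h0 : (n : Int) * pvSpan cs = 0 + (n : Int) * pvSpan cs := by ring
    rw [h0, pvTmpl_shift]
    simp

theorem pvB_eval (cs : List (List Int)) (tempo reps : Int) :
    generate_lead_melody_alt cs tempo reps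
      = (PySem.List.pyRange 0 reps 1).foldl (fun res rep =>
          res ++ (pvTmpl 0 cs).map (fun t => (t.1, t.2.1 + rep * pvSpan cs, t.2.2))) [] := by
  unfold generate_lead_melody_alt
  rw [pvPassB cs [] 0]
  simp

-- ===== VERDICT (by name: the statement is the Claim_ definition above) =====
theorem generate_lead_melody_spec : Claim_equal_generate_lead_melody := by
  intro cs tempo reps _
  unfold Spec_generate_lead_melody
  rw [pvB_eval]
  unfold generate_lead_melody
  by_cases hr : reps ≤ 0
  · rw [PySem.List.pyRange_one_eq_nil (by omega : reps ≤ 0)]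
    simp
  · push_neg at hr
    have hrep : reps = ((reps.toNat : Nat) : Int) := by omega
    by_cases hcs : cs = []
    · subst hcs
      rw [if_pos rfl]
      rw [hrep]
      induction reps.toNat with
      | zero => simp [PySem.List.pyRange_one_eq_nil]
      | succ n ih =>
        have hr2 : PySem.List.pyRange 0 ((n : Int) + 1) 1
            = PySem.List.pyRange 0 (n : Int) 1 ++ [(n : Int)] :=
          PySem.List.pyRange_one_succ_right (by omega)
        push_cast
        rw [hr2, List.foldl_append]
        push_cast at ih
        rw [← ih]
        simp [pvTmpl]
    · rw [if_neg hcs]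
      have hfun : (fun (st : List (Int × Int × Int) × Int) (_ : Int) =>
          cs.foldl (fun (st : List (Int × Int × Int) × Int) chord =>
            if (chord.length : Int) < 3 then st
            else
              let midi_notes := (PySem.List.sorted chord (fun x => x) false).map (fun note => note + 12)
              let inner := (midi_notes.zip [1, 1, 2]).foldl
                (fun (p : List (Int × Int × Int) × Int) nd => (p.1 ++ [(nd.1, p.2, nd.2)], p.2 + nd.2))
                (st.1, st.2)
              (inner.1, st.2 + 4)) st)
          = (fun (st : List (Int × Int × Int) × Int) (_ : Int) =>
              (st.1 ++ pvTmpl st.2 cs, st.2 + pvSpan cs)) := by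
        funext st x
        have := pvPassA cs st.1 st.2
        simpa using this
      rw [hfun, hrep, pvOuter cs reps.toNat]
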